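-- pv_equiv track=rewrite | github.com/raeez/topological-strings | scripts/quantum_shear_trace_diagram_normal_form.py | inversion_pairs
-- ===== SOURCE A (Python) =====
-- from typing import Dict, Iterable, Iterator, List, Sequence, Tuple
--
-- Word = Tuple[str, ...]
--
-- def inversion_pairs(word: Word) -> List[Tuple[int, int]]:
--     return [
--         (left, right)
--         for left, left_letter in enumerate(word)
--         if left_letter == "Y"
--         for right in range(left + 1, len(word))
--         if word[right] == "X"
--     ]
-- ===== SOURCE B (Python) =====
-- def inversion_pairs(word):
--     # Single reverse pass: maintain the X positions seen so far (to the right),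
--     # emit pair blocks per Y, reverse once at the end.
--     rev = []
--     xs = []
--     for i, c in reversed(list(enumerate(word))):
--         if c == "X":
--             xs.append(i)
--         elif c == "Y":
--             rev.extend((i, x) for x in xs)
--     rev.reverse()
--     return rev
-- ===== Notes on version B (the rewrite author's own statement) =====
-- stated objective: alternative
-- what changed: Replaced the nested comprehension (for every Y rescan the whole suffix for X) by a single right-to-left pass that maintains the list of X positions already seen and emits each Y's block directly, reversing the result once at the end.
import Mathlib
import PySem

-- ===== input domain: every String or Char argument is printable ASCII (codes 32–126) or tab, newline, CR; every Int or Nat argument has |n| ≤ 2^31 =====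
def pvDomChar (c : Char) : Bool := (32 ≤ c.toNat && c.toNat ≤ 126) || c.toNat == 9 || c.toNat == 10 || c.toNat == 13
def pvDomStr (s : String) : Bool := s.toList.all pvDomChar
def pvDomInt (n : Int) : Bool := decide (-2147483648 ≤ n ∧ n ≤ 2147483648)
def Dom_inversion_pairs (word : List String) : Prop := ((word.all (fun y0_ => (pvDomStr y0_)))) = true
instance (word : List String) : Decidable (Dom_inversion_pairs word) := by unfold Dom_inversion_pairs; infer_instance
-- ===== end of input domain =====

-- B replaces A's per-Y rescan of the suffix by one right-to-left pass that keeps the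
-- X positions seen so far (objective: alternative single-pass algorithm).


-- ===== PORT A =====
-- nested comprehension: for (left, letter) in enumerate(word) if letter == "Y",
-- for right in range(left+1, len(word)) if word[right] == "X" (index always in range).
def inversion_pairs (word : List String) : List (Int × Int) :=
  (PySem.List.enumerate word 0).foldl
    (fun acc p =>
      if p.2 == "Y" then
        (PySem.List.pyRange (p.1 + 1) (word.length : Int) 1).foldl
          (fun acc2 r =>
            if PySem.List.pyGetD word r "" == "X" then acc2 ++ [(p.1, r)] else acc2)
          acc
      else acc)
    []

-- ===== PORT B =====
-- one pass over reversed(list(enumerate(word))), state (rev, xs); final rev.reverse().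
def inversion_pairs_alt (word : List String) : List (Int × Int) :=
  let st := (PySem.List.enumerate word 0).reverse.foldl
    (fun (st : List (Int × Int) × List Int) p =>
      if p.2 == "X" then (st.1, st.2 ++ [p.1])
      else if p.2 == "Y" then (st.1 ++ st.2.map (fun x => (p.1, x)), st.2)
      else st)
    ([], [])
  st.1.reverse

-- ===== PRECONDITION & SPEC =====
def Spec_inversion_pairs (word : List String) (out : List (Int × Int)) : Prop := out = inversion_pairs_alt word
instance (word : List String) (out : List (Int × Int)) : Decidable (Spec_inversion_pairs word out) := by unfold Spec_inversion_pairs; infer_instance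

-- ===== CLAIM (what is proved, stated in full; the proofs are below) =====
def Claim_equal_inversion_pairs : Prop := ∀ (word : List String), Dom_inversion_pairs word → Spec_inversion_pairs word (inversion_pairs word)

-- ===== LEMMAS AND PROOFS =====

-- positions of the "X" entries of an enumerated suffix
def pvXIdx (ps : List (Int × String)) : List Int :=
  (ps.filter (fun p => p.2 == "X")).map (·.1)

-- reference result over an enumerated word: for each "Y", pair with every later "X"
def pvRef : List (Int × String) → List (Int × Int)
  | [] => []
  | p :: ps => (if p.2 == "Y" then (pvXIdx ps).map (fun x => (p.1, x)) else []) ++ pvRef ps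

theorem pvXIdx_cons (p : Int × String) (ps : List (Int × String)) :
    pvXIdx (p :: ps) = (if p.2 == "X" then [p.1] else []) ++ pvXIdx ps := by
  by_cases h : p.2 == "X" <;> simp [pvXIdx, h]

-- ---- B side ----
theorem pvAlt_fold (ps : List (Int × String)) :
    ps.reverse.foldl
      (fun (st : List (Int × Int) × List Int) p =>
        if p.2 == "X" then (st.1, st.2 ++ [p.1])
        else if p.2 == "Y" then (st.1 ++ st.2.map (fun x => (p.1, x)), st.2)
        else st)
      ([], [])
    = ((pvRef ps).reverse, (pvXIdx ps).reverse) := by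
  rw [List.foldl_reverse]
  induction ps with
  | nil => simp [pvRef, pvXIdx]
  | cons p ps ih =>
    rw [List.foldr_cons, ih]
    by_cases hx : p.2 == "X"
    · have hy : (p.2 == "Y") = false := by
        cases hxe : p.2 == "X" <;> simp_all
      simp [hx, hy, pvRef, pvXIdx_cons]
    · by_cases hy : p.2 == "Y" <;>
        simp [hx, hy, pvRef, pvXIdx_cons]

theorem pvAlt_eq_ref (word : List String) :
    inversion_pairs_alt word = pvRef (PySem.List.enumerate word 0) := by
  unfold inversion_pairs_alt
  rw [pvAlt_fold]
  simp

-- ---- A side ----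
-- (a) the inner scan range(k, n) collecting X positions equals pvXIdx of the enumerated suffix
theorem pvInner_eq (word : List String) :
    ∀ (m k : Nat), word.length = k + m →
      (PySem.List.pyRange (k : Int) (word.length : Int) 1).filter
          (fun r => PySem.List.pyGetD word r "" == "X")
        = pvXIdx (PySem.List.enumerate (word.drop k) (k : Int)) := by
  intro m
  induction m with
  | zero =>
    intro k hk
    rw [PySem.List.pyRange_one_eq_nil (by omega)]
    rw [List.drop_of_length_le (by omega)]
    simp [pvXIdx, PySem.List.enumerate]
  | succ m ih =>
    intro k hk
    have hklt : k < word.length := by omega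
    rw [PySem.List.pyRange_one_cons (by exact_mod_cast hklt)]
    have hdrop : word.drop k = word[k] :: word.drop (k + 1) :=
      List.drop_eq_getElem_cons hklt
    rw [hdrop, PySem.List.enumerate_cons, pvXIdx_cons, List.filter_cons]
    have hget : PySem.List.pyGetD word (k : Int) "" = word[k] := by
      rw [PySem.List.pyGetD_natCast]
      simp [hklt]
    have ih' := ih (k + 1) (by omega)
    push_cast at ih' ⊢
    rw [hget, ih']
    by_cases h : word[k] == "X" <;> simp [h]

-- A's fold, written pointwise as 'acc ++ block', over any pair list
def pvG (word : List String) (p : Int × String) : List (Int × Int) :=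
  if p.2 == "Y" then
    ((PySem.List.pyRange (p.1 + 1) (word.length : Int) 1).filter
        (fun r => PySem.List.pyGetD word r "" == "X")).map (fun r => (p.1, r))
  else []

theorem pvA_fold_flatMap (word : List String) (ps : List (Int × String))
    (acc : List (Int × Int)) :
    ps.foldl
      (fun acc p =>
        if p.2 == "Y" then
          (PySem.List.pyRange (p.1 + 1) (word.length : Int) 1).foldl
            (fun acc2 r =>
              if PySem.List.pyGetD word r "" == "X" then acc2 ++ [(p.1, r)] else acc2)
            acc
        else acc)
      acc
    = acc ++ ps.flatMap (pvG word) := by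
  have hstep : ps.foldl
      (fun acc p =>
        if p.2 == "Y" then
          (PySem.List.pyRange (p.1 + 1) (word.length : Int) 1).foldl
            (fun acc2 r =>
              if PySem.List.pyGetD word r "" == "X" then acc2 ++ [(p.1, r)] else acc2)
            acc
        else acc)
      acc
      = ps.foldl (fun acc p => acc ++ pvG word p) acc := by
    apply PySem.List.foldl_congr_mem
    intro acc p _
    by_cases hy : p.2 == "Y"
    · simp only [hy, pvG]
      rw [PySem.List.foldl_append_if (fun r => PySem.List.pyGetD word r "" == "X")
            (fun r => (p.1, r))]
      simp
    · simp [hy, pvG]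
  rw [hstep, PySem.List.foldl_append_eq_flatMap]

-- (b) the flatMap over an enumerated suffix equals pvRef, via pvInner_eq
theorem pvA_flatMap_eq_ref (word : List String) :
    ∀ (m k : Nat), word.length = k + m →
      (PySem.List.enumerate (word.drop k) (k : Int)).flatMap (pvG word)
        = pvRef (PySem.List.enumerate (word.drop k) (k : Int)) := by
  intro m
  induction m with
  | zero =>
    intro k hk
    rw [List.drop_of_length_le (by omega)]
    simp [PySem.List.enumerate, pvRef]
  | succ m ih =>
    intro k hk
    have hklt : k < word.length := by omega
    have hdrop : word.drop k = word[k] :: word.drop (k + 1) :=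
      List.drop_eq_getElem_cons hklt
    rw [hdrop, PySem.List.enumerate_cons, List.flatMap_cons, pvRef]
    have hinner := pvInner_eq word m (k + 1) (by omega)
    have htail := ih (k + 1) (by omega)
    push_cast at hinner htail ⊢
    rw [htail]
    congr 1
    by_cases hy : word[k] == "Y" <;> simp [pvG, hy, hinner]

-- ===== VERDICT (by name: the statement is the Claim_ definition above) =====
theorem inversion_pairs_spec : Claim_equal_inversion_pairs := by
  intro word _
  unfold Spec_inversion_pairs
  rw [pvAlt_eq_ref]
  unfold inversion_pairs
  rw [pvA_fold_flatMap]
  have h := pvA_flatMap_eq_ref word word.length 0 (by omega)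
  simpa using h
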